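-- pv_equiv track=rewrite | github.com/eligum/FIB-CDI-lab | lab-3/functions.py | _binary_canonical_code
-- ===== SOURCE A (Python) =====
-- from collections import Counter
--
-- def _binary_canonical_code(lengths: list[int]) -> list[str]:
--     """Returns the binary prefix code based on the given list of codeword lengths.
--
--     This is an optimized version that skips a lot of checks because the
--     input list is assumed to have certain guarantees. For example, it
--     assumes that the list is ordered increasingly and that the lengths
--     satisfy the Kraft-McMillan inequality.
--     """
--     counter = list(Counter(lengths).items())
--     codewords = []
--     num = 0
--     prev_length = counter[0][0]
--
--     for (length, count) in counter:
--         num = num << (length - prev_length)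
--         for _ in range(count):
--             codewords.append(f"{num:0{length}b}")
--             num += 1
--         prev_length = length
--
--     return codewords
-- ===== SOURCE B (Python) =====
-- def _binary_canonical_code(lengths: list[int]) -> list[str]:
--     """Returns the binary prefix code based on the given list of codeword lengths.
--
--     Stateless closed form: the canonical codeword value at position i is
--     sum(2**(lengths[i] - lengths[j]) for j < i) -- each earlier codeword
--     occupies a 2**(-lengths[j]) slice of code space, rescaled to length
--     lengths[i].  No running counter or Counter grouping is needed.
--     """
--     return [
--         format(sum(1 << (lengths[i] - lengths[j]) for j in range(i)),
--                f"0{lengths[i]}b")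
--         for i in range(len(lengths))
--     ]
-- ===== Notes on version B (the rewrite author's own statement) =====
-- stated objective: alternative
-- what changed: B replaces A's stateful shift-and-increment recurrence over Counter groups by a stateless closed form: the codeword value at position i is computed independently as sum(2**(lengths[i]-lengths[j]) for j<i), with no running num/prev state and no Counter.
-- outside the precondition, e.g. on _binary_canonical_code([1, 2, 1]): A returns ['0', '1', '100'], B raises ValueError
import Mathlib
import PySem

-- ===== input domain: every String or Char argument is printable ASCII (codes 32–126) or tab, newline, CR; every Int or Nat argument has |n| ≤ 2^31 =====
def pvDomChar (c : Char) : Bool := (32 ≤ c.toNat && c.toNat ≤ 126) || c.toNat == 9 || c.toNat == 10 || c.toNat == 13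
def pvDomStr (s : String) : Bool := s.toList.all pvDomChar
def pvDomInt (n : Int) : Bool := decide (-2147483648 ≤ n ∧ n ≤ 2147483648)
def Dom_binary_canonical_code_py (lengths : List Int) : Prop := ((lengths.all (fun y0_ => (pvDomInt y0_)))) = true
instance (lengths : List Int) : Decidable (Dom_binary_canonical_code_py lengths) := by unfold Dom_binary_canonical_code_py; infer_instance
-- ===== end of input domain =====

-- B replaces A's stateful shift-and-increment recurrence over Counter groups by a
-- stateless closed form per element (objective: alternative). Equivalence of RETURN
-- values on nonempty, increasingly sorted, nonnegative length lists (the documented domain).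

-- f"{num:0{length}b}" for num ≥ 0 and length ≥ 0 (the only case reached under Pre_;
-- Python raises ValueError for a negative width): binary digits of num, zero-padded
-- on the left to width `length`. Shared verbatim by both Pythons' format calls.
def pvFmtBin (num len : Int) : String :=
  let digits := Nat.toDigits 2 num.toNat
  String.ofList (List.replicate (len.toNat - digits.length) '0' ++ digits)

-- ===== PORT A =====
-- loop body of A's `for (length, count) in counter`; p = (length, count).
-- `num << (length - prev_length)`: shift is nonnegative under Pre_ (sorted input;
-- Python raises ValueError on a negative shift).  range(count) with count ≥ 0 is
-- List.range count.toNat (counts produced by Counter are ≥ 1).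
def pvStepA (st : List String × Int × Int) (p : Int × Int) : List String × Int × Int :=
  let num := st.2.1 <<< (p.1 - st.2.2).toNat
  let inner := (List.range p.2.toNat).foldl
    (fun (st2 : List String × Int) _ => (st2.1 ++ [pvFmtBin st2.2 p.1], st2.2 + 1))
    (st.1, num)
  (inner.1, inner.2, p.1)

def binary_canonical_code_py (lengths : List Int) : List String :=
  let counter := (PySem.Dict.counter lengths).items
  -- counter[0][0]: IndexError on an empty list (excluded by Pre_)
  let prev0 : Int := (counter.head?.getD (0, 0)).1
  (counter.foldl pvStepA ([], 0, prev0)).1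

-- ===== PORT B =====
-- B's single comprehension: codeword i = format(sum(1 << (l[i]-l[j]) for j < i), f"0{l[i]}b").
-- Indices come from range(len(lengths)) / range(i), so lengths[i]/lengths[j] are always in
-- range and getD is exact; `1 << k` has k ≥ 0 under Pre_ (sorted input), where .toNat is exact.
def binary_canonical_code_py_alt (lengths : List Int) : List String :=
  (List.range lengths.length).map (fun i =>
    let L := lengths.getD i 0
    pvFmtBin (((List.range i).map (fun j => (1 : Int) <<< (L - lengths.getD j 0).toNat)).sum) L)

-- ===== PRECONDITION & SPEC =====
-- Pre_ is the function's documented domain (docstring: "assumes that the list is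
-- ordered increasingly"): nonempty, sorted, first element ≥ 0.  Excluded inputs:
-- the empty list (A raises IndexError, B returns []), lists starting with a negative
-- length (A raises ValueError in the format spec or on a negative shift), and unsorted
-- lists, on which A usually raises ValueError (negative shift) but occasionally
-- returns an accidental non-prefix-code value (e.g. [1, 2, 1]) while B raises.
def Pre_binary_canonical_code_py (lengths : List Int) : Prop :=
  lengths ≠ [] ∧ List.Pairwise (· ≤ ·) lengths ∧ 0 ≤ lengths.head?.getD 0
instance (lengths : List Int) : Decidable (Pre_binary_canonical_code_py lengths) := by
  unfold Pre_binary_canonical_code_py; infer_instance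

def pvWitness_binary_canonical_code_py : List Int := [1, 2, 2]

def Spec_binary_canonical_code_py (lengths : List Int) (out : List String) : Prop :=
  out = binary_canonical_code_py_alt lengths
instance (lengths : List Int) (out : List String) : Decidable (Spec_binary_canonical_code_py lengths out) := by
  unfold Spec_binary_canonical_code_py; infer_instance

-- ===== CLAIM (what is proved, stated in full; the proofs are below) =====
def Claim_equal_binary_canonical_code_py : Prop := ∀ (lengths : List Int), Dom_binary_canonical_code_py lengths → Pre_binary_canonical_code_py lengths → Spec_binary_canonical_code_py lengths (binary_canonical_code_py lengths)

-- ===== LEMMAS AND PROOFS =====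

-- proof-only intermediate: the flat left-to-right pass (shift by the length delta,
-- emit, increment) that both A's grouped fold and B's closed form are reduced to.
def pvStepB (st : List String × Int × Int) (l : Int) : List String × Int × Int :=
  let num := st.2.1 <<< (l - st.2.2).toNat
  (st.1 ++ [pvFmtBin num l], num + 1, l)

-- A's inner `for _ in range(count)` loop, in closed form.
lemma pv_inner_loop (x : Int) : ∀ (n : Nat) (acc : List String) (num : Int),
    (List.range n).foldl
      (fun (st2 : List String × Int) _ => (st2.1 ++ [pvFmtBin st2.2 x], st2.2 + 1))
      (acc, num)
    = (acc ++ (List.range n).map (fun (i : Nat) => pvFmtBin (num + (i : Int)) x), num + n) := by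
  intro n
  induction n with
  | zero => intro acc num; simp
  | succ n ih =>
    intro acc num
    rw [List.range_succ, List.foldl_append, ih]
    simp only [List.foldl_cons, List.foldl_nil, List.map_append, Prod.mk.injEq]
    exact ⟨by simp [List.append_assoc], by push_cast; ring⟩

-- one step of A's outer loop, in closed form.
lemma pv_stepA_eq (acc : List String) (num prev : Int) (x c : Int) :
    pvStepA (acc, num, prev) (x, c)
    = (acc ++ (List.range c.toNat).map
          (fun (i : Nat) => pvFmtBin (num <<< (x - prev).toNat + (i : Int)) x),
       num <<< (x - prev).toNat + c.toNat, x) := by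
  simp only [pvStepA]
  rw [pv_inner_loop]

-- flat pass over a run of equal lengths starting at prev = x (every shift is 0).
lemma pv_run_same (x : Int) : ∀ (c : Nat) (acc : List String) (num : Int),
    (List.replicate c x).foldl pvStepB (acc, num, x)
    = (acc ++ (List.range c).map (fun (i : Nat) => pvFmtBin (num + (i : Int)) x), num + c, x) := by
  intro c
  induction c with
  | zero => simp
  | succ c ih =>
    intro acc num
    rw [List.replicate_succ, List.foldl_cons]
    have hstep : pvStepB (acc, num, x) x = (acc ++ [pvFmtBin num x], num + 1, x) := by
      simp [pvStepB]
    rw [hstep, ih, List.range_succ_eq_map]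
    simp only [List.map_cons, List.map_map, Prod.mk.injEq, Nat.cast_zero, add_zero,
      Nat.cast_add, Nat.cast_one]
    refine ⟨?_, by ring, trivial⟩
    rw [List.append_assoc, List.singleton_append]
    congr 1
    refine congrArg₂ List.cons rfl (List.map_congr_left ?_)
    intro i _
    simp only [Function.comp]
    congr 1
    push_cast
    ring

-- flat pass over a nonempty run of equal lengths from an arbitrary prev.
lemma pv_run_full (x : Int) (c : Nat) (hc : 1 ≤ c) (acc : List String) (num prev : Int) :
    (List.replicate c x).foldl pvStepB (acc, num, prev)
    = (acc ++ (List.range c).map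
          (fun (i : Nat) => pvFmtBin (num <<< (x - prev).toNat + (i : Int)) x),
       num <<< (x - prev).toNat + c, x) := by
  obtain ⟨c, rfl⟩ : ∃ c', c = c' + 1 := ⟨c - 1, by omega⟩
  rw [List.replicate_succ, List.foldl_cons]
  have hstep : pvStepB (acc, num, prev)  x
      = (acc ++ [pvFmtBin (num <<< (x - prev).toNat) x], num <<< (x - prev).toNat + 1, x) := by
    simp [pvStepB]
  rw [hstep, pv_run_same, List.range_succ_eq_map]
  simp only [List.map_cons, List.map_map, Prod.mk.injEq, Nat.cast_zero, add_zero,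
    Nat.cast_add, Nat.cast_one]
  refine ⟨?_, by ring, trivial⟩
  rw [List.append_assoc, List.singleton_append]
  refine congrArg (acc ++ ·) (congrArg₂ List.cons rfl (List.map_congr_left ?_))
  intro i _
  simp only [Function.comp]
  congr 1
  push_cast
  ring

-- folding Set.add over elements that avoid x keeps a leading x in place.
lemma pv_foldl_add_cons (x : Int) : ∀ (ys : List Int) (s : List Int), x ∉ ys →
    ys.foldl PySem.Set.add (x :: s) = x :: ys.foldl PySem.Set.add s := by
  intro ys
  induction ys with
  | nil => intro s _; simp
  | cons y ys ih =>
    intro s hx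
    have hxy : x ≠ y := fun h => hx (h ▸ List.mem_cons_self ..)
    have hxys : x ∉ ys := fun h => hx (List.mem_cons_of_mem _ h)
    rw [List.foldl_cons, List.foldl_cons]
    have hadd : PySem.Set.add (x :: s) y = x :: PySem.Set.add s y := by
      by_cases hy : y ∈ s
      · rw [PySem.Set.add_of_mem hy, PySem.Set.add_of_mem (List.mem_cons_of_mem _ hy)]
      · have hyxs : y ∉ x :: s := by
          intro hmem
          rcases List.mem_cons.mp hmem with h' | h'
          · exact hxy h'.symm
          · exact hy h'
        rw [PySem.Set.add_of_not_mem hy, PySem.Set.add_of_not_mem hyxs]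
        rfl
    rw [hadd, ih _ hxys]

-- dedup of a nonempty run followed by x-free elements.
lemma pv_ofList_decomp (x : Int) (c : Nat) (hc : 1 ≤ c) (ys : List Int) (hx : x ∉ ys) :
    PySem.Set.ofList (List.replicate c x ++ ys) = x :: PySem.Set.ofList ys := by
  have hrep : ∀ m : Nat, List.foldl PySem.Set.add [x] (List.replicate m x) = [x] := by
    intro m
    induction m with
    | zero => rfl
    | succ m ih =>
      rw [List.replicate_succ, List.foldl_cons, PySem.Set.add_of_mem (List.mem_cons_self ..), ih]
  obtain ⟨c, rfl⟩ : ∃ c', c = c' + 1 := ⟨c - 1, by omega⟩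
  show List.foldl PySem.Set.add PySem.Set.empty _ = _
  rw [List.foldl_append, List.replicate_succ, List.foldl_cons]
  have hemp : PySem.Set.add PySem.Set.empty x = [x] := rfl
  rw [hemp, hrep, pv_foldl_add_cons x ys ([] : List Int) hx]
  rfl

-- a sorted nonempty list is a maximal run of its head followed by a sorted x-free tail.
lemma pv_sorted_decomp (x : Int) (t : List Int) (h : List.Pairwise (· ≤ ·) (x :: t)) :
    ∃ (c : Nat) (ys : List Int), 1 ≤ c ∧ x :: t = List.replicate c x ++ ys ∧
      x ∉ ys ∧ List.Pairwise (· ≤ ·) ys ∧ (x :: t).count x = c := by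
  set p : Int → Bool := fun y => y == x with hp
  set c := ((x :: t).takeWhile p).length with hcdef
  set ys := (x :: t).dropWhile p with hysdef
  have htake : (x :: t).takeWhile p = List.replicate c x := by
    apply List.eq_replicate_of_mem
    intro b hb
    have hpb := List.mem_takeWhile_imp hb
    simpa [hp] using hpb
  have hdec : x :: t = List.replicate c x ++ ys := by
    rw [← htake, hysdef, List.takeWhile_append_dropWhile]
  have hc : 1 ≤ c := by
    rw [hcdef, List.takeWhile_cons_of_pos (by simp [hp])]
    simp
  have hxys : x ∉ ys := by
    intro hmem
    obtain ⟨y, ys', hys'⟩ : ∃ y ys', ys = y :: ys' := by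
      cases hy : ys with
      | nil => rw [hy] at hmem; simp at hmem
      | cons y ys' => exact ⟨y, ys', rfl⟩
    have hpy : p y = false := by
      have hh := List.head?_dropWhile_not p (x :: t)
      rw [← hysdef, hys'] at hh
      simpa using hh
    have hyx : y ≠ x := by simpa [hp] using hpy
    have hys_sorted : List.Pairwise (· ≤ ·) ys :=
      List.Pairwise.sublist (hysdef ▸ List.dropWhile_sublist p) h
    have hyinl : y ∈ x :: t := (List.dropWhile_sublist p).subset (hysdef ▸ hys' ▸ List.mem_cons_self ..)
    have hyt : y ∈ t := by
      cases List.mem_cons.mp hyinl with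
      | inl h' => exact absurd h' hyx
      | inr h' => exact h'
    have hxle : x ≤ y := (List.pairwise_cons.mp h).1 y hyt
    have hxmem' : x ∈ ys' := by
      rw [hys'] at hmem
      cases List.mem_cons.mp hmem with
      | inl h' => exact absurd h'.symm hyx
      | inr h' => exact h'
    have hylex : y ≤ x := by
      rw [hys'] at hys_sorted
      exact (List.pairwise_cons.mp hys_sorted).1 x hxmem'
    exact hyx (le_antisymm hylex hxle)
  have hys_sorted : List.Pairwise (· ≤ ·) ys :=
    List.Pairwise.sublist (hysdef ▸ List.dropWhile_sublist p) h
  refine ⟨c, ys, hc, hdec, hxys, hys_sorted, ?_⟩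
  rw [hdec, List.count_append, List.count_replicate]
  simp [List.count_eq_zero.mpr hxys]

-- A's fold over Counter items equals the flat pass, for sorted input.
lemma pv_main : ∀ (n : Nat) (xs : List Int), xs.length ≤ n →
    List.Pairwise (· ≤ ·) xs → ∀ (acc : List String) (num prev : Int),
    ((PySem.Set.ofList xs).map (fun k => (k, (List.count k xs : Int)))).foldl pvStepA
        (acc, num, prev)
    = xs.foldl pvStepB (acc, num, prev) := by
  intro n
  induction n with
  | zero =>
    intro xs hlen _ acc num prev
    have hnil : xs = [] := List.eq_nil_of_length_eq_zero (Nat.le_zero.mp hlen)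
    subst hnil
    simp [PySem.Set.ofList_nil]
  | succ n ih =>
    intro xs hlen hs acc num prev
    cases xs with
    | nil => simp [PySem.Set.ofList_nil]
    | cons x t =>
      obtain ⟨c, ys, hc, hdec, hxys, hys_sorted, hcount⟩ := pv_sorted_decomp x t hs
      have hof : PySem.Set.ofList (x :: t) = x :: PySem.Set.ofList ys := by
        rw [hdec]; exact pv_ofList_decomp x c hc ys hxys
      have hctail : ∀ k ∈ PySem.Set.ofList ys,
          (fun k => (k, (List.count k (x :: t) : Int))) k
            = (fun k => (k, (List.count k ys : Int))) k := by
        intro k hk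
        have hky : k ∈ ys := (PySem.Set.mem_ofList ys k).mp hk
        have hkx : (x == k) = false := by
          simp only [beq_eq_false_iff_ne]
          intro h'
          exact hxys (h' ▸ hky)
        simp only [Prod.mk.injEq, true_and]
        rw [hdec, List.count_append, List.count_replicate, hkx]
        simp
      have hys_len : ys.length ≤ n := by
        have hlen2 := congrArg List.length hdec
        simp only [List.length_cons, List.length_append, List.length_replicate] at hlen2
        simp only [List.length_cons] at hlen
        omega
      rw [hof, List.map_cons, List.foldl_cons, hcount,
        List.map_congr_left hctail, pv_stepA_eq, ih ys hys_len hys_sorted]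
      rw [hdec, List.foldl_append, pv_run_full x c hc]
      simp

-- the flat pass in closed form: codeword i carries num·2^(l[i]-prev) + Σ_{j<i} 2^(l[i]-l[j]).
lemma pv_flat_closed : ∀ (xs : List Int), List.Pairwise (· ≤ ·) xs →
    ∀ (prev : Int), (∀ y ∈ xs, prev ≤ y) → ∀ (acc : List String) (num : Int),
    (xs.foldl pvStepB (acc, num, prev)).1
    = acc ++ (List.range xs.length).map (fun i =>
        let L := xs.getD i 0
        pvFmtBin (num <<< (L - prev).toNat
          + ((List.range i).map (fun j => (1 : Int) <<< (L - xs.getD j 0).toNat)).sum) L) := by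
  intro xs
  induction xs with
  | nil => intro _ prev _ acc num; simp
  | cons x t ih =>
    intro hs prev hprev acc num
    have hxle : ∀ y ∈ t, x ≤ y := (List.pairwise_cons.mp hs).1
    have hpx : prev ≤ x := hprev x (List.mem_cons_self ..)
    rw [List.foldl_cons]
    have hstep : pvStepB (acc, num, prev) x
        = (acc ++ [pvFmtBin (num <<< (x - prev).toNat) x], num <<< (x - prev).toNat + 1, x) := by
      simp [pvStepB]
    rw [hstep, ih (List.pairwise_cons.mp hs).2 x hxle]
    rw [List.length_cons, List.range_succ_eq_map, List.map_cons, List.map_map]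
    simp only [List.getD_cons_zero, List.range_zero, List.map_nil, List.sum_nil, add_zero]
    rw [List.append_assoc, List.singleton_append]
    refine congrArg (acc ++ ·) (congrArg₂ List.cons rfl (List.map_congr_left ?_))
    intro i hi
    have hit : i < t.length := List.mem_range.mp hi
    have hLmem : t.getD i 0 ∈ t := by
      rw [List.getD_eq_getElem _ _ hit]
      exact List.getElem_mem hit
    have hxL : x ≤ t.getD i 0 := hxle _ hLmem
    simp only [Function.comp, List.getD_cons_succ]
    congr 1
    · -- the codeword value at shifted index i+1
      rw [List.range_succ_eq_map, List.map_cons, List.map_map, List.sum_cons]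
      simp only [List.getD_cons_zero]
      have hmap : List.map ((fun j => (1 : Int) <<< (t.getD i 0 - (x :: t).getD j 0).toNat) ∘ Nat.succ)
            (List.range i)
          = List.map (fun j => (1 : Int) <<< (t.getD i 0 - t.getD j 0).toNat) (List.range i) := by
        refine List.map_congr_left ?_
        intro j _
        simp [Function.comp]
      rw [hmap]
      have hsplit : (x - prev).toNat + (t.getD i 0 - x).toNat = (t.getD i 0 - prev).toNat := by
        omega
      rw [Int.shiftLeft_eq, Int.shiftLeft_eq, Int.shiftLeft_eq, Int.shiftLeft_eq,
        ← hsplit, pow_add]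
      ring

-- ===== VERDICT (by name: the statement is the Claim_ definition above) =====
theorem binary_canonical_code_py_spec : Claim_equal_binary_canonical_code_py := by
  unfold Claim_equal_binary_canonical_code_py
  intro lengths _ hpre
  obtain ⟨hne, hs, _⟩ := hpre
  unfold Spec_binary_canonical_code_py
  cases lengths with
  | nil => exact absurd rfl hne
  | cons x t =>
    obtain ⟨c, ys, hc, hdec, hxys, _, _⟩ := pv_sorted_decomp x t hs
    have hof : PySem.Set.ofList (x :: t) = x :: PySem.Set.ofList ys := by
      rw [hdec]; exact pv_ofList_decomp x c hc ys hxys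
    have hmain := pv_main (x :: t).length (x :: t) le_rfl hs [] 0 x
    have hflat := pv_flat_closed (x :: t) hs x
      (by
        intro y hy
        rcases List.mem_cons.mp hy with h' | h'
        · exact le_of_eq h'.symm
        · exact (List.pairwise_cons.mp hs).1 y h')
      [] 0
    simp only [binary_canonical_code_py, binary_canonical_code_py_alt,
      PySem.Dict.items_counter, hof, List.map_cons, List.head?_cons, Option.getD_some]
    rw [hof, List.map_cons] at hmain
    rw [congrArg Prod.fst hmain, hflat]
    simp only [Int.zero_shiftLeft, zero_add, List.nil_append]
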